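-- pv_equiv track=rewrite | github.com/alphavisiontech/gn-care | ctrgcn/rk3588/dataset.py | _fuzzy_class_match
-- ===== SOURCE A (Python) =====
-- def _fuzzy_class_match(normalized):
--     """Fuzzy matching for complex class name variations"""
--     # Keywords for each class
--     class_keywords = {
--         'waving_hands': ['wave', 'hand', 'waving'],
--         'falling': ['fall', 'falling', 'slip', 'fell'],
--         'sitting': ['sit', 'sitting', 'seated'],
--         'standing': ['stand', 'standing', 'upright'],
--         'walking': ['walk', 'walking'],
--         'bending_down': ['bend', 'bending', 'stoop'],
--         'crouching': ['crouch', 'crouching', 'squat'],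
--         'sleeping': ['sleep', 'sleeping', 'lying', 'lie']
--     }
--
--     normalized_words = set(normalized.split('_'))
--
--     # Find best match based on keyword overlap
--     best_match = None
--     max_overlap = 0
--
--     for class_name, keywords in class_keywords.items():
--         overlap = len(normalized_words.intersection(set(keywords)))
--         if overlap > max_overlap and overlap > 0:
--             max_overlap = overlap
--             best_match = class_name
--
--     return best_match if best_match else normalized
-- ===== SOURCE B (Python) =====
-- _CLASS_NAMES = ['waving_hands', 'falling', 'sitting', 'standing', 'walking',
--                 'bending_down', 'crouching', 'sleeping']
--
-- def _keyword_index(word):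
--     if word in ('wave', 'hand', 'waving'): return 0
--     if word in ('fall', 'falling', 'slip', 'fell'): return 1
--     if word in ('sit', 'sitting', 'seated'): return 2
--     if word in ('stand', 'standing', 'upright'): return 3
--     if word in ('walk', 'walking'): return 4
--     if word in ('bend', 'bending', 'stoop'): return 5
--     if word in ('crouch', 'crouching', 'squat'): return 6
--     if word in ('sleep', 'sleeping', 'lying', 'lie'): return 7
--     return None
--
-- def _fuzzy_class_match(normalized):
--     """Fuzzy matching for complex class name variations"""
--     # route each distinct word through a keyword classifier into 8 fixed counters
--     counts = [0] * 8
--     for word in set(normalized.split('_')):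
--         i = _keyword_index(word)
--         if i is not None:
--             counts[i] += 1
--     # first strict maximum wins, in table order (same tie rule as the original)
--     best_match, best_count = None, 0
--     for name, c in zip(_CLASS_NAMES, counts):
--         if c > best_count:
--             best_match, best_count = name, c
--     return best_match if best_match else normalized
-- ===== Notes on version B (the rewrite author's own statement) =====
-- stated objective: alternative
-- what changed: B is word-driven instead of class-driven: each distinct word is routed through an if-chain keyword classifier into one of 8 fixed counters in a single pass, and the winner is picked by a zip scan of class names against counters (first strict maximum), replacing A's eight per-class set intersections and running-max loop over the keyword table.
import Mathlib
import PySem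

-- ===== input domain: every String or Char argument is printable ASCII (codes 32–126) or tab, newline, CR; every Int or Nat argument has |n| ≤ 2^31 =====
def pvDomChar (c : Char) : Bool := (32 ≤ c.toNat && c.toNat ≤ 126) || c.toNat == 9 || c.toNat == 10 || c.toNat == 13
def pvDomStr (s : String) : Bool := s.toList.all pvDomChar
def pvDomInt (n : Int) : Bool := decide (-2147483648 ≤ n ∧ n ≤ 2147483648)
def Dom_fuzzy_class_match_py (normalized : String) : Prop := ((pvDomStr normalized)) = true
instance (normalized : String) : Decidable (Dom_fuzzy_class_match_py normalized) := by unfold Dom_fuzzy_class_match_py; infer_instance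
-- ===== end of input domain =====

-- B replaces A's eight per-class set intersections and running-max loop by routing each
-- distinct word through an if-chain keyword classifier into 8 fixed counters, then a
-- zip scan for the first strict maximum (alternative decomposition; same winner, same tie rule).

-- ===== PORT A =====
def pvClassKeywordsA : List (String × List String) :=
  [("waving_hands", ["wave", "hand", "waving"]),
   ("falling", ["fall", "falling", "slip", "fell"]),
   ("sitting", ["sit", "sitting", "seated"]),
   ("standing", ["stand", "standing", "upright"]),
   ("walking", ["walk", "walking"]),
   ("bending_down", ["bend", "bending", "stoop"]),
   ("crouching", ["crouch", "crouching", "squat"]),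
   ("sleeping", ["sleep", "sleeping", "lying", "lie"])]

def fuzzy_class_match_py (normalized : String) : String :=
  -- sep "_" is nonempty, so split? is always `some`; .getD [] is never taken
  let normalized_words : PySem.Set String :=
    PySem.Set.ofList ((PySem.Str.split? normalized "_").getD [])
  let r := pvClassKeywordsA.foldl
    (fun (st : Option String × Int) ck =>
      let overlap : Int :=
        PySem.Set.len (PySem.Set.inter normalized_words (PySem.Set.ofList ck.2))
      if overlap > st.2 ∧ overlap > 0 then (some ck.1, overlap) else st)
    (none, 0)
  match r.1 with
  | some c => c
  | none => normalized

-- ===== PORT B =====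
def pvClassNames : List String :=
  ["waving_hands", "falling", "sitting", "standing", "walking",
   "bending_down", "crouching", "sleeping"]

-- Source B's _keyword_index: an if-chain classifying one word into one of the 8 counters
def pvKeywordIndex (word : String) : Option Int :=
  if word = "wave" ∨ word = "hand" ∨ word = "waving" then some 0
  else if word = "fall" ∨ word = "falling" ∨ word = "slip" ∨ word = "fell" then some 1
  else if word = "sit" ∨ word = "sitting" ∨ word = "seated" then some 2
  else if word = "stand" ∨ word = "standing" ∨ word = "upright" then some 3
  else if word = "walk" ∨ word = "walking" then some 4
  else if word = "bend" ∨ word = "bending" ∨ word = "stoop" then some 5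
  else if word = "crouch" ∨ word = "crouching" ∨ word = "squat" then some 6
  else if word = "sleep" ∨ word = "sleeping" ∨ word = "lying" ∨ word = "lie" then some 7
  else none

def fuzzy_class_match_py_alt (normalized : String) : String :=
  -- counters are order-independent, so folding over the set is order-safe
  let counts : List Int :=
    (PySem.Set.ofList ((PySem.Str.split? normalized "_").getD [])).foldl
      (fun cs word =>
        match pvKeywordIndex word with
        | some i => PySem.List.pySetD cs i (PySem.List.pyGetD cs i 0 + 1)
        | none => cs)
      (List.replicate 8 0)
  let sel := (pvClassNames.zip counts).foldl
    (fun (st : Option String × Int) nc => if nc.2 > st.2 then (some nc.1, nc.2) else st)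
    (none, 0)
  match sel.1 with
  | some best_match => best_match
  | none => normalized

-- ===== PRECONDITION & SPEC =====
def Spec_fuzzy_class_match_py (normalized : String) (out : String) : Prop := out = fuzzy_class_match_py_alt normalized
instance (normalized : String) (out : String) : Decidable (Spec_fuzzy_class_match_py normalized out) := by unfold Spec_fuzzy_class_match_py; infer_instance

-- ===== CLAIM (what is proved, stated in full; the proofs are below) =====
def Claim_equal_fuzzy_class_match_py : Prop := ∀ (normalized : String), Dom_fuzzy_class_match_py normalized → Spec_fuzzy_class_match_py normalized (fuzzy_class_match_py normalized)

-- ===== LEMMAS AND PROOFS =====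

-- number of words of s that the classifier routes to counter i
def pvCnt (i : Int) (s : List String) : Int :=
  ((s.countP (fun w => pvKeywordIndex w == some i) : Nat) : Int)

-- all 25 keywords of the table, for the case split in the pv_hit_ lemmas
def pvAllKeywords : List String :=
  ["wave", "hand", "waving", "fall", "falling", "slip", "fell", "sit", "sitting", "seated",
   "stand", "standing", "upright", "walk", "walking", "bend", "bending", "stoop",
   "crouch", "crouching", "squat", "sleep", "sleeping", "lying", "lie"]

theorem pv_idx_none (w : String) (hw : w ∉ pvAllKeywords) : pvKeywordIndex w = none := by
  simp only [pvAllKeywords, List.mem_cons, List.not_mem_nil, or_false, not_or] at hw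
  unfold pvKeywordIndex
  split_ifs <;> first | rfl | tauto

theorem pv_idx_cases (w : String) (i : Int) (h : pvKeywordIndex w = some i) :
    i = 0 ∨ i = 1 ∨ i = 2 ∨ i = 3 ∨ i = 4 ∨ i = 5 ∨ i = 6 ∨ i = 7 := by
  unfold pvKeywordIndex at h
  split_ifs at h <;> simp_all

-- the classifier, pointwise, class by class: routed to counter k ↔ keyword of class k
theorem pv_hit0 : ∀ w, (pvKeywordIndex w == some (0:Int)) = (["wave", "hand", "waving"] : List String).contains w := by
  intro w
  by_cases hw : w ∈ pvAllKeywords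
  · fin_cases hw <;> rfl
  · have hc : w ∉ (["wave", "hand", "waving"] : List String) := by
      simp only [pvAllKeywords, List.mem_cons, not_or] at hw
      simp only [List.mem_cons, List.not_mem_nil, or_false, not_or]
      tauto
    simp [pv_idx_none w hw, hc]

theorem pv_hit1 : ∀ w, (pvKeywordIndex w == some (1:Int)) = (["fall", "falling", "slip", "fell"] : List String).contains w := by
  intro w
  by_cases hw : w ∈ pvAllKeywords
  · fin_cases hw <;> rfl
  · have hc : w ∉ (["fall", "falling", "slip", "fell"] : List String) := by
      simp only [pvAllKeywords, List.mem_cons, not_or] at hw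
      simp only [List.mem_cons, List.not_mem_nil, or_false, not_or]
      tauto
    simp [pv_idx_none w hw, hc]

theorem pv_hit2 : ∀ w, (pvKeywordIndex w == some (2:Int)) = (["sit", "sitting", "seated"] : List String).contains w := by
  intro w
  by_cases hw : w ∈ pvAllKeywords
  · fin_cases hw <;> rfl
  · have hc : w ∉ (["sit", "sitting", "seated"] : List String) := by
      simp only [pvAllKeywords, List.mem_cons, not_or] at hw
      simp only [List.mem_cons, List.not_mem_nil, or_false, not_or]
      tauto
    simp [pv_idx_none w hw, hc]

theorem pv_hit3 : ∀ w, (pvKeywordIndex w == some (3:Int)) = (["stand", "standing", "upright"] : List String).contains w := by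
  intro w
  by_cases hw : w ∈ pvAllKeywords
  · fin_cases hw <;> rfl
  · have hc : w ∉ (["stand", "standing", "upright"] : List String) := by
      simp only [pvAllKeywords, List.mem_cons, not_or] at hw
      simp only [List.mem_cons, List.not_mem_nil, or_false, not_or]
      tauto
    simp [pv_idx_none w hw, hc]

theorem pv_hit4 : ∀ w, (pvKeywordIndex w == some (4:Int)) = (["walk", "walking"] : List String).contains w := by
  intro w
  by_cases hw : w ∈ pvAllKeywords
  · fin_cases hw <;> rfl
  · have hc : w ∉ (["walk", "walking"] : List String) := by
      simp only [pvAllKeywords, List.mem_cons, not_or] at hw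
      simp only [List.mem_cons, List.not_mem_nil, or_false, not_or]
      tauto
    simp [pv_idx_none w hw, hc]

theorem pv_hit5 : ∀ w, (pvKeywordIndex w == some (5:Int)) = (["bend", "bending", "stoop"] : List String).contains w := by
  intro w
  by_cases hw : w ∈ pvAllKeywords
  · fin_cases hw <;> rfl
  · have hc : w ∉ (["bend", "bending", "stoop"] : List String) := by
      simp only [pvAllKeywords, List.mem_cons, not_or] at hw
      simp only [List.mem_cons, List.not_mem_nil, or_false, not_or]
      tauto
    simp [pv_idx_none w hw, hc]

theorem pv_hit6 : ∀ w, (pvKeywordIndex w == some (6:Int)) = (["crouch", "crouching", "squat"] : List String).contains w := by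
  intro w
  by_cases hw : w ∈ pvAllKeywords
  · fin_cases hw <;> rfl
  · have hc : w ∉ (["crouch", "crouching", "squat"] : List String) := by
      simp only [pvAllKeywords, List.mem_cons, not_or] at hw
      simp only [List.mem_cons, List.not_mem_nil, or_false, not_or]
      tauto
    simp [pv_idx_none w hw, hc]

theorem pv_hit7 : ∀ w, (pvKeywordIndex w == some (7:Int)) = (["sleep", "sleeping", "lying", "lie"] : List String).contains w := by
  intro w
  by_cases hw : w ∈ pvAllKeywords
  · fin_cases hw <;> rfl
  · have hc : w ∉ (["sleep", "sleeping", "lying", "lie"] : List String) := by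
      simp only [pvAllKeywords, List.mem_cons, not_or] at hw
      simp only [List.mem_cons, List.not_mem_nil, or_false, not_or]
      tauto
    simp [pv_idx_none w hw, hc]

-- A's intersection size for a class equals B's count for that class's counter
theorem pv_bridge (s : List String) (k : Int) (kws : List String)
    (h : ∀ w, (pvKeywordIndex w == some k) = kws.contains w) :
    PySem.Set.len (PySem.Set.inter s (PySem.Set.ofList kws)) = pvCnt k s := by
  have hcnt : s.countP (fun w => decide (w ∈ kws))
      = s.countP (fun w => pvKeywordIndex w == some k) := by
    apply List.countP_congr
    intro w _
    rw [h w]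
    simp
  simp [PySem.Set.len, PySem.Set.inter, ← List.countP_eq_length_filter, hcnt, pvCnt]

-- B's counting loop, fully general in the word list and the 8 start values
theorem pv_counts (s : List String) :
    ∀ a0 a1 a2 a3 a4 a5 a6 a7 : Int,
    s.foldl (fun cs word =>
        match pvKeywordIndex word with
        | some i => PySem.List.pySetD cs i (PySem.List.pyGetD cs i 0 + 1)
        | none => cs) [a0, a1, a2, a3, a4, a5, a6, a7]
    = [a0 + pvCnt 0 s, a1 + pvCnt 1 s, a2 + pvCnt 2 s, a3 + pvCnt 3 s,
       a4 + pvCnt 4 s, a5 + pvCnt 5 s, a6 + pvCnt 6 s, a7 + pvCnt 7 s] := by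
  induction s with
  | nil => intros; simp [pvCnt]
  | cons w ws ih =>
    intro a0 a1 a2 a3 a4 a5 a6 a7
    simp only [List.foldl_cons]
    cases h : pvKeywordIndex w with
    | none =>
      rw [ih]
      simp only [pvCnt, List.countP_cons, h]
      norm_num
    | some i =>
      rcases pv_idx_cases w i h with hi | hi | hi | hi | hi | hi | hi | hi <;> subst hi <;> dsimp only
      · rw [show PySem.List.pySetD [a0, a1, a2, a3, a4, a5, a6, a7] (0 : Int)
              (PySem.List.pyGetD [a0, a1, a2, a3, a4, a5, a6, a7] (0 : Int) 0 + 1) = [a0 + 1, a1, a2, a3, a4, a5, a6, a7] from rfl, ih]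
        simp [pvCnt, h]
        omega
      · rw [show PySem.List.pySetD [a0, a1, a2, a3, a4, a5, a6, a7] (1 : Int)
              (PySem.List.pyGetD [a0, a1, a2, a3, a4, a5, a6, a7] (1 : Int) 0 + 1) = [a0, a1 + 1, a2, a3, a4, a5, a6, a7] from rfl, ih]
        simp [pvCnt, h]
        omega
      · rw [show PySem.List.pySetD [a0, a1, a2, a3, a4, a5, a6, a7] (2 : Int)
              (PySem.List.pyGetD [a0, a1, a2, a3, a4, a5, a6, a7] (2 : Int) 0 + 1) = [a0, a1, a2 + 1, a3, a4, a5, a6, a7] from rfl, ih]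
        simp [pvCnt, h]
        omega
      · rw [show PySem.List.pySetD [a0, a1, a2, a3, a4, a5, a6, a7] (3 : Int)
              (PySem.List.pyGetD [a0, a1, a2, a3, a4, a5, a6, a7] (3 : Int) 0 + 1) = [a0, a1, a2, a3 + 1, a4, a5, a6, a7] from rfl, ih]
        simp [pvCnt, h]
        omega
      · rw [show PySem.List.pySetD [a0, a1, a2, a3, a4, a5, a6, a7] (4 : Int)
              (PySem.List.pyGetD [a0, a1, a2, a3, a4, a5, a6, a7] (4 : Int) 0 + 1) = [a0, a1, a2, a3, a4 + 1, a5, a6, a7] from rfl, ih]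
        simp [pvCnt, h]
        omega
      · rw [show PySem.List.pySetD [a0, a1, a2, a3, a4, a5, a6, a7] (5 : Int)
              (PySem.List.pyGetD [a0, a1, a2, a3, a4, a5, a6, a7] (5 : Int) 0 + 1) = [a0, a1, a2, a3, a4, a5 + 1, a6, a7] from rfl, ih]
        simp [pvCnt, h]
        omega
      · rw [show PySem.List.pySetD [a0, a1, a2, a3, a4, a5, a6, a7] (6 : Int)
              (PySem.List.pyGetD [a0, a1, a2, a3, a4, a5, a6, a7] (6 : Int) 0 + 1) = [a0, a1, a2, a3, a4, a5, a6 + 1, a7] from rfl, ih]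
        simp [pvCnt, h]
        omega
      · rw [show PySem.List.pySetD [a0, a1, a2, a3, a4, a5, a6, a7] (7 : Int)
              (PySem.List.pyGetD [a0, a1, a2, a3, a4, a5, a6, a7] (7 : Int) 0 + 1) = [a0, a1, a2, a3, a4, a5, a6, a7 + 1] from rfl, ih]
        simp [pvCnt, h]
        omega

-- A's first-strict-maximum fold equals B's first-maximum fold: with a nonnegative
-- running best, 'c > best ∧ c > 0' and 'c > best' are the same test
theorem pv_sel2 (l : List (String × Int)) :
    ∀ st : Option String × Int, 0 ≤ st.2 →
    l.foldl (fun st p => if p.2 > st.2 ∧ p.2 > 0 then (some p.1, p.2) else st) st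
    = l.foldl (fun st p => if p.2 > st.2 then (some p.1, p.2) else st) st := by
  induction l with
  | nil => intro st _; rfl
  | cons p ps ih =>
    intro st hst
    simp only [List.foldl_cons]
    by_cases hgt : p.2 > st.2
    · have : p.2 > st.2 ∧ p.2 > 0 := ⟨hgt, by omega⟩
      rw [if_pos this, if_pos hgt]
      exact ih _ (by simp; omega)
    · rw [if_neg (by tauto), if_neg hgt]
      exact ih _ hst

-- A's whole selection over the keyword table, rewritten to B's zip scan over the counters
theorem pv_fold_eq (s : List String) :
    pvClassKeywordsA.foldl
      (fun (st : Option String × Int) ck =>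
        let overlap : Int := PySem.Set.len (PySem.Set.inter s (PySem.Set.ofList ck.2))
        if overlap > st.2 ∧ overlap > 0 then (some ck.1, overlap) else st)
      (none, 0)
    = (pvClassNames.zip [pvCnt 0 s, pvCnt 1 s, pvCnt 2 s, pvCnt 3 s,
                         pvCnt 4 s, pvCnt 5 s, pvCnt 6 s, pvCnt 7 s]).foldl
      (fun (st : Option String × Int) nc => if nc.2 > st.2 then (some nc.1, nc.2) else st)
      (none, 0) := by
  have hA : pvClassKeywordsA.foldl
      (fun (st : Option String × Int) ck =>
        let overlap : Int := PySem.Set.len (PySem.Set.inter s (PySem.Set.ofList ck.2))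
        if overlap > st.2 ∧ overlap > 0 then (some ck.1, overlap) else st)
      (none, 0)
    = ((pvClassKeywordsA.map (fun ck =>
          (ck.1, PySem.Set.len (PySem.Set.inter s (PySem.Set.ofList ck.2))))).foldl
        (fun (st : Option String × Int) p =>
          if p.2 > st.2 ∧ p.2 > 0 then (some p.1, p.2) else st)
        (none, 0)) := (List.foldl_map
        (f := fun ck : String × List String =>
          (ck.1, PySem.Set.len (PySem.Set.inter s (PySem.Set.ofList ck.2))))
        (g := fun (st : Option String × Int) p =>
          if p.2 > st.2 ∧ p.2 > 0 then (some p.1, p.2) else st)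
        (l := pvClassKeywordsA) (init := ((none : Option String), (0 : Int)))).symm
  rw [hA]
  have hmap : pvClassKeywordsA.map (fun ck =>
      (ck.1, PySem.Set.len (PySem.Set.inter s (PySem.Set.ofList ck.2))))
    = pvClassNames.zip [pvCnt 0 s, pvCnt 1 s, pvCnt 2 s, pvCnt 3 s,
                        pvCnt 4 s, pvCnt 5 s, pvCnt 6 s, pvCnt 7 s] := by
    simp only [pvClassKeywordsA, pvClassNames, List.map, List.zip, List.zipWith]
    rw [pv_bridge s 0 _ pv_hit0, pv_bridge s 1 _ pv_hit1, pv_bridge s 2 _ pv_hit2,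
        pv_bridge s 3 _ pv_hit3, pv_bridge s 4 _ pv_hit4, pv_bridge s 5 _ pv_hit5,
        pv_bridge s 6 _ pv_hit6, pv_bridge s 7 _ pv_hit7]
  rw [hmap]
  exact pv_sel2 _ (none, 0) (by norm_num)

-- ===== VERDICT (by name: the statement is the Claim_ definition above) =====
theorem fuzzy_class_match_py_spec : Claim_equal_fuzzy_class_match_py := by
  intro normalized _
  unfold Spec_fuzzy_class_match_py
  unfold fuzzy_class_match_py fuzzy_class_match_py_alt
  dsimp only
  rw [pv_fold_eq]
  rw [show (List.replicate 8 (0:Int)) = [0, 0, 0, 0, 0, 0, 0, 0] from rfl]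
  rw [pv_counts]
  norm_num
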